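-- pv_equiv track=rewrite | github.com/habix137/work_time | module/main.py | group_projects
-- ===== SOURCE A (Python) =====
-- DEFAULT_GROUP = "Ungrouped"
--
-- def group_projects(projects: dict, groups: list):
--     """
--     Returns ordered dict-like structure:
--       { group_name: [(project_name, project_dict), ...], ... }
--     Groups are ordered by data['groups'].
--     """
--     grouped = {g: [] for g in groups}
--     # include unknown groups if any
--     for pname, p in (projects or {}).items():
--         grp = (p.get("group") or DEFAULT_GROUP).strip() or DEFAULT_GROUP
--         if grp not in grouped:
--             grouped[grp] = []
--         grouped[grp].append((pname, p))
--
--     # sort projects by name inside each group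
--     for g in grouped:
--         grouped[g].sort(key=lambda x: x[0].lower())
--
--     return grouped
-- ===== SOURCE B (Python) =====
-- DEFAULT_GROUP = "Ungrouped"
--
--
-- def _grp(p):
--     return (p.get("group") or DEFAULT_GROUP).strip() or DEFAULT_GROUP
--
--
-- def group_projects(projects: dict, groups: list):
--     # Three separate stages instead of A's incremental dict + per-group sorts:
--     # (1) one global stable sort of all items by lowercased name,
--     # (2) explicit construction of the ordered key list (known groups first,
--     #     then unknown groups in encounter order) with a seen-set,
--     # (3) one distribution pass into fresh buckets, assembled over the key list.
--     items = list((projects or {}).items())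
--     ordered = sorted(items, key=lambda x: x[0].lower())
--     keys, seen = [], set()
--     for g in list(groups) + [_grp(p) for _, p in items]:
--         if g not in seen:
--             seen.add(g)
--             keys.append(g)
--     bucket = {}
--     for pname, p in ordered:
--         bucket.setdefault(_grp(p), []).append((pname, p))
--     return {k: bucket.get(k, []) for k in keys}
-- ===== Notes on version B (the rewrite author's own statement) =====
-- stated objective: alternative
-- what changed: B replaces A's incremental dict-with-per-group-sorts by three separate stages: one global stable sort of all items by lowercased name, explicit construction of the ordered key list with a seen-set (known groups first, unknown groups in encounter order), and a single distribution pass into fresh buckets assembled over that key list.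
import Mathlib
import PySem

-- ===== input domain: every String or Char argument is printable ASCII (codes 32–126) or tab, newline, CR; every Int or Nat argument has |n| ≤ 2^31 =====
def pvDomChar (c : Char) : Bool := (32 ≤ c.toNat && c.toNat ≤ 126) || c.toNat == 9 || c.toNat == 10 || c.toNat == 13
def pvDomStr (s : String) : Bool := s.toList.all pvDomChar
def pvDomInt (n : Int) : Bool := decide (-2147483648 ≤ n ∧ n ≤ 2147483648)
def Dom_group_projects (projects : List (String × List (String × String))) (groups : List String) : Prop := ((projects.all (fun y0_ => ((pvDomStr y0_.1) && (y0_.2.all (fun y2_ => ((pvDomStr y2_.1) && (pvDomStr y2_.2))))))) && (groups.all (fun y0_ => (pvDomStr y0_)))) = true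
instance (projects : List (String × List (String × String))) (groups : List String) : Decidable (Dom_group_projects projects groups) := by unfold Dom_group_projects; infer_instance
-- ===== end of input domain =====

-- B builds the ordered key list explicitly, sorts all items once by lowercased name,
-- and fills each bucket by filtering that one sorted list (objective: alternative decomposition).

-- shared helper: grp = (p.get("group") or DEFAULT_GROUP).strip() or DEFAULT_GROUP
def pvGrp (p : List (String × String)) : String :=
  let g1 : String :=
    match (PySem.Dict.mk p).get? "group" with
    | none => "Ungrouped"
    | some s => if s = "" then "Ungrouped" else s
  let t := PySem.Str.strip g1
  if t = "" then "Ungrouped" else t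

-- ===== PORT A =====
def group_projects (projects : List (String × List (String × String))) (groups : List String) : List (String × List (String × (List (String × String)))) :=
  -- grouped = {g: [] for g in groups}
  let grouped : PySem.Dict String (List (String × List (String × String))) :=
    groups.foldl (fun d g => d.insert g []) PySem.Dict.empty
  -- for pname, p in (projects or {}).items(): …
  let grouped := projects.foldl (fun d pr =>
      let grp := pvGrp pr.2
      let d := if d.contains grp then d else d.insert grp []
      d.modify grp [] (fun v => v ++ [pr])) grouped
  -- for g in grouped: grouped[g].sort(key=lambda x: x[0].lower())
  grouped.items.map (fun q => (q.1, PySem.List.sorted q.2 (fun x => PySem.Str.lower x.1)))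

-- ===== PORT B =====
def group_projects_alt (projects : List (String × List (String × String))) (groups : List String) : List (String × List (String × (List (String × String)))) :=
  -- ordered = sorted(items, key=lambda x: x[0].lower())
  let ordered := PySem.List.sorted projects (fun x => PySem.Str.lower x.1)
  -- keys, seen = [], set(); for g in list(groups) + [_grp(p) for _, p in items]:
  --   if g not in seen: seen.add(g); keys.append(g)
  let ks := (groups ++ projects.map (fun pr => pvGrp pr.2)).foldl
      (fun (st : List String × PySem.Set String) g =>
        if PySem.Set.contains st.2 g then st else (st.1 ++ [g], PySem.Set.add st.2 g))
      ([], PySem.Set.empty)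
  -- bucket = {}; for pname, p in ordered: bucket.setdefault(_grp(p), []).append((pname, p))
  -- (setdefault-then-append is exactly Dict.modify: d[k] = d.get(k, []) + [x], new keys append)
  let bucket := ordered.foldl
      (fun d pr => d.modify (pvGrp pr.2) [] (fun v => v ++ [pr]))
      (PySem.Dict.empty : PySem.Dict String (List (String × List (String × String))))
  -- {k: bucket.get(k, []) for k in keys}   (keys are distinct, so this is the assoc list in order)
  ks.1.map (fun k => (k, bucket.getD k []))

-- ===== PRECONDITION & SPEC =====
def Spec_group_projects (projects : List (String × List (String × String))) (groups : List String) (out : List (String × List (String × (List (String × String))))) : Prop := out = group_projects_alt projects groups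
instance (projects : List (String × List (String × String))) (groups : List String) (out : List (String × List (String × (List (String × String))))) : Decidable (Spec_group_projects projects groups out) := by unfold Spec_group_projects; infer_instance

-- ===== CLAIM (what is proved, stated in full; the proofs are below) =====
def Claim_equal_group_projects : Prop := ∀ (projects : List (String × List (String × String))) (groups : List String), Dom_group_projects projects groups → Spec_group_projects projects groups (group_projects projects groups)

-- ===== LEMMAS AND PROOFS =====

-- A's per-project step ("if grp not in grouped: grouped[grp] = []" then append) is a single modify.
theorem pv_stepA_eq_modify {ν : Type} (d : PySem.Dict String (List ν)) (g : String) (x : ν) :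
    (if d.contains g then d else d.insert g []).modify g [] (fun v => v ++ [x])
      = d.modify g [] (fun v => v ++ [x]) := by
  by_cases h : d.contains g
  · simp [h]
  · have h' : d.contains g = false := by simpa using h
    rw [if_neg h]
    show (d.insert g []).insert g ((d.insert g []).getD g [] ++ [x])
        = d.insert g (d.getD g [] ++ [x])
    rw [PySem.Dict.getD_insert_self, PySem.Dict.insert_insert_self,
        PySem.Dict.getD_of_not_contains d [] h']

-- insertBy puts x in front when it goes before everything.
theorem pv_insertBy_cons {α : Type} (bef : α → α → Bool) (x : α) (l : List α)
    (h : ∀ z ∈ l, bef x z = true) : PySem.List.insertBy bef x l = x :: l := by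
  cases l with
  | nil => rfl
  | cons y ys => simp [PySem.List.insertBy, h y (by simp)]

-- insertBy into a key-sorted list keeps it key-sorted.
theorem pv_insertBy_pairwise {α κ : Type} [LinearOrder κ] (key : α → κ) (x : α) (l : List α)
    (h : l.Pairwise (fun a b => key a ≤ key b)) :
    (PySem.List.insertBy (fun a b => decide (key a < key b)) x l).Pairwise
      (fun a b => key a ≤ key b) := by
  induction l with
  | nil => simp [PySem.List.insertBy]
  | cons y ys ih =>
    rcases List.pairwise_cons.mp h with ⟨hy, hys⟩
    by_cases hb : key x < key y
    · simp only [PySem.List.insertBy, hb, decide_true, if_true]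
      refine List.pairwise_cons.mpr ⟨?_, h⟩
      intro z hz
      rcases List.mem_cons.mp hz with rfl | hz
      · exact le_of_lt hb
      · exact le_of_lt (lt_of_lt_of_le hb (hy z hz))
    · simp only [PySem.List.insertBy, hb, decide_false]
      refine List.pairwise_cons.mpr ⟨?_, ih hys⟩
      intro z hz
      rcases (PySem.List.mem_insertBy _ _ _ _).mp hz with hz | hz
      · exact hz ▸ le_of_not_gt hb
      · exact hy z hz

-- filter commutes with insertBy on a key-sorted list.
theorem pv_filter_insertBy {α κ : Type} [LinearOrder κ] (key : α → κ) (p : α → Bool)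
    (x : α) (l : List α) (h : l.Pairwise (fun a b => key a ≤ key b)) :
    (PySem.List.insertBy (fun a b => decide (key a < key b)) x l).filter p
      = if p x then PySem.List.insertBy (fun a b => decide (key a < key b)) x (l.filter p)
        else l.filter p := by
  induction l with
  | nil => cases hp : p x <;> simp [PySem.List.insertBy, List.filter, hp]
  | cons y ys ih =>
    rcases List.pairwise_cons.mp h with ⟨hy, hys⟩
    by_cases hb : key x < key y
    · simp only [PySem.List.insertBy, hb, decide_true, if_true]
      have hall : ∀ z ∈ (y :: ys).filter p, decide (key x < key z) = true := by
        intro z hz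
        have hzmem := List.mem_of_mem_filter hz
        rcases List.mem_cons.mp hzmem with rfl | hz'
        · exact decide_eq_true hb
        · exact decide_eq_true (lt_of_lt_of_le hb (hy z hz'))
      cases hp : p x
      · simp [List.filter, hp]
      · rw [pv_insertBy_cons _ _ _ hall]
        simp [List.filter, hp]
    · simp only [PySem.List.insertBy, hb, decide_false]
      cases hpy : p y
      · simpa [List.filter, hpy] using ih hys
      · cases hp : p x <;>
          simp_all [List.filter, PySem.List.insertBy, ih hys]

-- filter commutes with the insertion-sort fold from a sorted accumulator.
theorem pv_filter_foldl_insertBy {α κ : Type} [LinearOrder κ] (key : α → κ) (p : α → Bool)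
    (l : List α) (acc : List α) (h : acc.Pairwise (fun a b => key a ≤ key b)) :
    (l.foldl (fun acc x => PySem.List.insertBy (fun a b => decide (key a < key b)) x acc) acc).filter p
      = (l.filter p).foldl
          (fun acc x => PySem.List.insertBy (fun a b => decide (key a < key b)) x acc)
          (acc.filter p) := by
  induction l generalizing acc with
  | nil => rfl
  | cons x xs ih =>
    simp only [List.foldl_cons, List.filter]
    rw [ih _ (pv_insertBy_pairwise key x acc h), pv_filter_insertBy key p x acc h]
    cases hp : p x <;> simp

-- sorted-then-filter = filter-then-sorted (stability of Python's sort).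
theorem pv_filter_sorted {α κ : Type} [LinearOrder κ] (key : α → κ) (p : α → Bool)
    (xs : List α) :
    (PySem.List.sorted xs key).filter p = PySem.List.sorted (xs.filter p) key := by
  rw [PySem.List.sorted_eq_foldl_insertBy, PySem.List.sorted_eq_foldl_insertBy]
  simpa using pv_filter_foldl_insertBy key p xs [] (by simp)

-- B's "if g not in seen: seen.add(g); keys.append(g)" loop: the keys list tracks the
-- seen set exactly, and both compute Set.update.
theorem pv_foldl_seen_eq_update (l : List String) (s : PySem.Set String) :
    l.foldl
      (fun (st : List String × PySem.Set String) g =>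
        if PySem.Set.contains st.2 g then st else (st.1 ++ [g], PySem.Set.add st.2 g))
      (s, s)
      = (PySem.Set.update s l, PySem.Set.update s l) := by
  induction l generalizing s with
  | nil => rfl
  | cons g gs ih =>
    show gs.foldl _ (if PySem.Set.contains s g then (s, s) else (s ++ [g], PySem.Set.add s g))
        = (PySem.Set.update (PySem.Set.add s g) gs, PySem.Set.update (PySem.Set.add s g) gs)
    by_cases h : PySem.Set.contains s g
    · rw [if_pos h]
      have hadd : PySem.Set.add s g = s := by
        simp only [PySem.Set.add]
        rw [if_pos h]
      rw [hadd]
      exact ih s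
    · rw [if_neg h]
      have hadd : PySem.Set.add s g = s ++ [g] := by
        simp only [PySem.Set.add]
        rw [if_neg h]
      rw [hadd]
      exact ih (s ++ [g])

-- "all values are []" invariant for the {g: [] for g in groups} skeleton
def pvAllNil (d : PySem.Dict String (List (String × List (String × String)))) : Prop :=
  ∀ c, d.getD c [] = []

theorem pv_allNil_skeleton (groups : List String)
    (d : PySem.Dict String (List (String × List (String × String)))) (h : pvAllNil d) :
    pvAllNil (groups.foldl (fun d g => d.insert g []) d) := by
  induction groups generalizing d with
  | nil => exact h
  | cons g gs ih =>
    refine ih _ ?_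
    intro c
    rw [PySem.Dict.getD_insert]
    split <;> simp [h c]

-- keyed modify fold: getD is initial value ++ filtered input
theorem pv_getD_foldl_modify_key {β : Type} (l : List β) (key : β → String)
    (d : PySem.Dict String (List β)) (c : String) :
    (l.foldl (fun d x => d.modify (key x) [] (fun v => v ++ [x])) d).getD c []
      = d.getD c [] ++ l.filter (fun x => key x == c) := by
  have h := PySem.Dict.getD_foldl_modify_append (l.map (fun x => (key x, x))) d c
  rw [List.foldl_map] at h
  simp only [List.filter_map, List.map_map, Function.comp_def] at h
  simpa using h

-- abbreviations used by the main proof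
def pvKey (x : String × List (String × String)) : String := PySem.Str.lower x.1
def pvGrpOf (pr : String × List (String × String)) : String := pvGrp pr.2

theorem pv_main (projects : List (String × List (String × String))) (groups : List String) :
    group_projects projects groups = group_projects_alt projects groups := by
  -- names for A's intermediate dictionaries
  set sk : PySem.Dict String (List (String × List (String × String))) :=
    groups.foldl (fun d g => d.insert g []) PySem.Dict.empty with hsk
  set dictA := projects.foldl
      (fun d pr => d.modify (pvGrpOf pr) [] (fun v => v ++ [pr])) sk with hdictA
  have hshowA : group_projects projects groups
      = dictA.items.map (fun q => (q.1, PySem.List.sorted q.2 pvKey)) := by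
    rw [group_projects, hdictA, hsk]
    exact congrArg (fun d => PySem.Dict.items d |>.map
        (fun q => (q.1, PySem.List.sorted q.2 pvKey)))
      (PySem.List.foldl_congr_mem projects _ _ _
        (fun acc (x : String × List (String × String)) _ =>
          pv_stepA_eq_modify acc (pvGrp x.2) x))
  have hshowB : group_projects_alt projects groups
      = (PySem.Set.update PySem.Set.empty (groups ++ projects.map pvGrpOf)).map
          (fun k => (k, ((PySem.List.sorted projects pvKey).foldl
              (fun d pr => d.modify (pvGrpOf pr) [] (fun v => v ++ [pr]))
              PySem.Dict.empty).getD k [])) := by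
    rw [group_projects_alt]
    have h := pv_foldl_seen_eq_update (groups ++ projects.map (fun pr => pvGrp pr.2))
        PySem.Set.empty
    show ((groups ++ projects.map (fun pr => pvGrp pr.2)).foldl
        (fun (st : List String × PySem.Set String) g =>
          if PySem.Set.contains st.2 g then st else (st.1 ++ [g], PySem.Set.add st.2 g))
        ([], PySem.Set.empty)).1.map _ = _
    rw [show (([], PySem.Set.empty) : List String × PySem.Set String)
        = ((PySem.Set.empty : PySem.Set String), (PySem.Set.empty : PySem.Set String)) from rfl, h]
    rfl
  -- key facts about A
  have nodupSk : sk.keys.Nodup := by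
    rw [hsk]
    exact PySem.Dict.nodup_keys_foldl_insert groups (fun _ _ => []) _
      PySem.Dict.nodup_keys_empty
  have nodupA : dictA.keys.Nodup := by
    rw [hdictA]
    exact PySem.Dict.nodup_keys_foldl_modify_key projects pvGrpOf [] _ _ nodupSk
  have keysSk : sk.keys = PySem.Set.update PySem.Set.empty groups := by
    rw [hsk, PySem.Dict.keys_foldl_insert groups (fun _ _ => []) PySem.Dict.empty]
    simp [PySem.Dict.keys_empty]
  have keysA : dictA.keys
      = PySem.Set.update (PySem.Set.update PySem.Set.empty groups) (projects.map pvGrpOf) := by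
    rw [hdictA, PySem.Dict.keys_foldl_modify_key projects pvGrpOf [] _ sk, keysSk]
  -- A's key list in insertion order is B's explicitly built key list
  have hkeys : dictA.keys
      = PySem.Set.update PySem.Set.empty (groups ++ projects.map pvGrpOf) := by
    rw [keysA]
    simp [PySem.Set.update, List.foldl_append]
  -- A's bucket values
  have allNilSk : pvAllNil sk := by
    rw [hsk]
    exact pv_allNil_skeleton groups PySem.Dict.empty (fun c => PySem.Dict.getD_empty c [])
  have valA : ∀ c, dictA.getD c [] = projects.filter (fun pr => pvGrpOf pr == c) := by
    intro c
    rw [hdictA, pv_getD_foldl_modify_key projects pvGrpOf sk c, allNilSk c, List.nil_append]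
  -- B's bucket values
  have valB : ∀ c, ((PySem.List.sorted projects pvKey).foldl
        (fun d pr => d.modify (pvGrpOf pr) [] (fun v => v ++ [pr]))
        (PySem.Dict.empty : PySem.Dict String (List (String × List (String × String))))).getD c []
      = PySem.List.sorted (projects.filter (fun pr => pvGrpOf pr == c)) pvKey := by
    intro c
    rw [pv_getD_foldl_modify_key _ pvGrpOf _ c, PySem.Dict.getD_empty, List.nil_append]
    exact pv_filter_sorted pvKey (fun pr => pvGrpOf pr == c) projects
  -- assemble
  rw [hshowA, hshowB, PySem.Dict.items_eq_map_keys dictA nodupA [], List.map_map, hkeys]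
  refine List.map_congr_left ?_
  intro k _
  simp only [Function.comp_apply, valA k, valB k]

-- ===== VERDICT (by name: the statement is the Claim_ definition above) =====
theorem group_projects_spec : Claim_equal_group_projects := by
  intro projects groups _
  show group_projects projects groups = group_projects_alt projects groups
  exact pv_main projects groups
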